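-- pv_equiv track=rewrite | github.com/varunks04/AlgoNest | algonest/backtracking/permutations.py | permutations_no_duplicates
-- ===== SOURCE A (Python) =====
-- from typing import Iterable, List, Sequence
--
-- def permutations_no_duplicates(values: Iterable[int]) -> List[List[int]]:
--     """Return unique permutations."""
--     nums = sorted(list(values))
--     used = [False] * len(nums)
--     output: List[List[int]] = []
--
--     def _dfs(path: List[int]) -> None:
--         if len(path) == len(nums):
--             output.append(path[:])
--             return
--         for candidate_index in range(len(nums)):
--             if used[candidate_index]:
--                 continue
--             if (
--                 candidate_index > 0
--                 and nums[candidate_index] == nums[candidate_index - 1]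
--                 and not used[candidate_index - 1]
--             ):
--                 continue
--             used[candidate_index] = True
--             path.append(nums[candidate_index])
--             _dfs(path)
--             path.pop()
--             used[candidate_index] = False
--
--     _dfs([])
--     return output
-- ===== SOURCE B (Python) =====
-- from typing import Iterable, List
--
--
-- def permutations_no_duplicates(values: Iterable[int]) -> List[List[int]]:
--     """Return unique permutations (counter-style DFS over value groups, no used[] markers)."""
--     nums = sorted(values)
--     groups: List[List[int]] = []  # [value, remaining-count] pairs, ascending values
--     for v in nums:
--         if groups and groups[-1][0] == v:
--             groups[-1][1] += 1
--         else:
--             groups.append([v, 1])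
--     output: List[List[int]] = []
--
--     def _dfs(path: List[int], remaining: int) -> None:
--         if remaining == 0:
--             output.append(path)
--             return
--         for group in groups:
--             if group[1] > 0:
--                 group[1] -= 1
--                 _dfs(path + [group[0]], remaining - 1)
--                 group[1] += 1
--
--     _dfs([], len(nums))
--     return output
-- ===== Notes on version B (the rewrite author's own statement) =====
-- stated objective: alternative
-- what changed: A's recursive DFS over all n positions with a used[] marker array and a skip-duplicates test is replaced by a counter-style DFS over run-length groups of equal values: the input is compressed into (value, remaining-count) pairs and the branching loop runs over distinct values only, with no used[] array and no duplicate-skipping condition.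
import Mathlib
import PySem

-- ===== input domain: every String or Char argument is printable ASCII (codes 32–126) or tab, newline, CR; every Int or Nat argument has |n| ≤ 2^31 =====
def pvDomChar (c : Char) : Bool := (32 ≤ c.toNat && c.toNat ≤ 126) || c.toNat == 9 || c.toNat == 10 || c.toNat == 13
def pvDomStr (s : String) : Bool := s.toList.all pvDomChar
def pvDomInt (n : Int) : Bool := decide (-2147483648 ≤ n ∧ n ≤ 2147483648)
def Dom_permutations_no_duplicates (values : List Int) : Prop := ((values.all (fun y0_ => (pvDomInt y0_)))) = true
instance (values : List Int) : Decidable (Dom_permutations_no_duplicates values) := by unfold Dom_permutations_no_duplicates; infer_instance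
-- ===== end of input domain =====

-- B replaces A's used[]-marker DFS over individual positions by a counter DFS over (value, remaining-count)
-- groups, shrinking the branching loop from n slots to the number of distinct values (objective: alternative).

-- ===== PORT A =====
-- _dfs: used[] is restored after each recursive call, so threading it functionally is exact;
-- fuel only bounds the recursion depth (nums.length+1 levels), it is never exhausted from the entry point.
def pvDfsA (nums : List Int) (used : List Bool) (path : List Int) : Nat → List (List Int)
  | 0 => []
  | fuel+1 =>
    if path.length = nums.length then [path]
    else
      (List.range nums.length).foldl (fun acc i =>
        if used.getD i false then acc
        else if 0 < i ∧ nums.getD i 0 = nums.getD (i-1) 0 ∧ used.getD (i-1) false = false then acc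
        else acc ++ pvDfsA nums (used.set i true) (path ++ [nums.getD i 0]) fuel) []

def permutations_no_duplicates (values : List Int) : List (List Int) :=
  let nums := PySem.List.sorted values (fun x => x) false
  pvDfsA nums (List.replicate nums.length false) [] (nums.length + 1)

-- ===== PORT B =====
-- the group-building loop: `groups[-1][1] += 1` / `groups.append([v, 1])`
def pvBgStep (groups : List (Int × Int)) (v : Int) : List (Int × Int) :=
  match groups.getLast? with
  | some g => if g.1 = v then groups.dropLast ++ [(g.1, g.2 + 1)] else groups ++ [(v, 1)]
  | none => [(v, 1)]

-- _dfs of B: `remaining` (= len(nums) - len(path), always ≥ 0) is the structural recursion argument;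
-- the in-place decrement/restore of group[1] is threaded functionally via List.set.
def pvDfsB (groups : List (Int × Int)) (path : List Int) : Nat → List (List Int)
  | 0 => [path]
  | r+1 =>
    (List.range groups.length).foldl (fun acc j =>
      let g := groups.getD j (0, 0)
      if 0 < g.2 then acc ++ pvDfsB (groups.set j (g.1, g.2 - 1)) (path ++ [g.1]) r
      else acc) []

def permutations_no_duplicates_alt (values : List Int) : List (List Int) :=
  let nums := PySem.List.sorted values (fun x => x) false
  let groups := nums.foldl pvBgStep []
  pvDfsB groups [] nums.length

-- ===== PRECONDITION & SPEC =====
def Spec_permutations_no_duplicates (values : List Int) (out : List (List Int)) : Prop := out = permutations_no_duplicates_alt values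
instance (values : List Int) (out : List (List Int)) : Decidable (Spec_permutations_no_duplicates values out) := by unfold Spec_permutations_no_duplicates; infer_instance

-- ===== CLAIM (what is proved, stated in full; the proofs are below) =====
def Claim_equal_permutations_no_duplicates : Prop := ∀ (values : List Int), Dom_permutations_no_duplicates values → Spec_permutations_no_duplicates values (permutations_no_duplicates values)

-- ===== LEMMAS AND PROOFS =====

-- Abstract DFS state: one entry per block of equal values, (value, used-count, remaining-count).
def pvBlockLen (g : Int × Nat × Nat) : Nat := g.2.1 + g.2.2
def pvNums (st : List (Int × Nat × Nat)) : List Int :=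
  st.flatMap (fun g => List.replicate (pvBlockLen g) g.1)
def pvUsed (st : List (Int × Nat × Nat)) : List Bool :=
  st.flatMap (fun g => List.replicate g.2.1 true ++ List.replicate g.2.2 false)
def pvGrp (st : List (Int × Nat × Nat)) : List (Int × Int) :=
  st.map (fun g => (g.1, (g.2.2 : Int)))
def pvRem (st : List (Int × Nat × Nat)) : Nat := (st.map (fun g => g.2.2)).sum
def pvGet (st : List (Int × Nat × Nat)) (j : Nat) : Int × Nat × Nat := st.getD j (0,0,0)
def pvBump (st : List (Int × Nat × Nat)) (j : Nat) : List (Int × Nat × Nat) :=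
  st.set j ((pvGet st j).1, (pvGet st j).2.1 + 1, (pvGet st j).2.2 - 1)
def pvPre (st : List (Int × Nat × Nat)) (j : Nat) : Nat := ((st.take j).map pvBlockLen).sum

lemma pvGet_mem (st : List (Int × Nat × Nat)) (j : Nat) (hj : j < st.length) :
    pvGet st j ∈ st := by
  have : pvGet st j = st[j] := by
    simp [pvGet, List.getD_eq_getElem?_getD, List.getElem?_eq_getElem hj]
  rw [this]; exact List.getElem_mem hj

lemma pvGet_cons_succ (g : Int × Nat × Nat) (tl : List (Int × Nat × Nat)) (j : Nat) :
    pvGet (g :: tl) (j+1) = pvGet tl j := by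
  simp [pvGet]

lemma pvGet_cons_zero (g : Int × Nat × Nat) (tl : List (Int × Nat × Nat)) :
    pvGet (g :: tl) 0 = g := by
  simp [pvGet]

lemma pvRepSwap {α : Type} (n : Nat) (a : α) (X : List α) :
    List.replicate n a ++ a :: X = a :: (List.replicate n a ++ X) := by
  rw [← List.singleton_append, ← List.append_assoc, ← List.replicate_succ',
    List.replicate_succ, List.cons_append]

lemma pvNums_bump (st : List (Int × Nat × Nat)) (j : Nat) (hj : j < st.length)
    (hr : 0 < (pvGet st j).2.2) : pvNums (pvBump st j) = pvNums st := by
  induction st generalizing j with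
  | nil => simp at hj
  | cons g tl ih =>
    cases j with
    | zero =>
      simp only [pvBump, pvGet_cons_zero, List.set_cons_zero, pvNums, List.flatMap_cons]
      rw [pvGet_cons_zero] at hr
      have : pvBlockLen (g.1, g.2.1 + 1, g.2.2 - 1) = pvBlockLen g := by
        simp [pvBlockLen]; omega
      rw [this]
    | succ j =>
      simp only [pvBump, pvGet_cons_succ, List.set_cons_succ, pvNums, List.flatMap_cons]
      rw [pvGet_cons_succ] at hr
      simp only [List.length_cons, Nat.succ_lt_succ_iff] at hj
      have := ih j hj hr
      simp only [pvBump, pvNums] at this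
      rw [this]

lemma pvUsed_bump (st : List (Int × Nat × Nat)) (j : Nat) (hj : j < st.length)
    (hr : 0 < (pvGet st j).2.2) :
    pvUsed (pvBump st j) = (pvUsed st).set (pvPre st j + (pvGet st j).2.1) true := by
  induction st generalizing j with
  | nil => simp at hj
  | cons g tl ih =>
    cases j with
    | zero =>
      rw [pvGet_cons_zero] at hr ⊢
      obtain ⟨r', hr'⟩ : ∃ r', g.2.2 = r' + 1 := ⟨g.2.2 - 1, by omega⟩
      simp only [pvBump, pvGet_cons_zero, List.set_cons_zero, pvUsed, List.flatMap_cons,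
        pvPre, List.take_zero, List.map_nil, List.sum_nil, Nat.zero_add, hr', Nat.add_sub_cancel]
      rw [List.append_assoc, List.append_assoc]
      have h1 : g.2.1 = (List.replicate g.2.1 true).length + 0 := by simp
      conv_rhs => rw [h1, List.set_append_right _ _ (by simp)]
      simp [List.replicate_succ']
      rw [pvRepSwap, List.set_cons_zero]
    | succ j =>
      rw [pvGet_cons_succ] at hr ⊢
      simp only [List.length_cons, Nat.succ_lt_succ_iff] at hj
      simp only [pvBump, pvGet_cons_succ, List.set_cons_succ, pvUsed, List.flatMap_cons]
      have hpre : pvPre (g :: tl) (j+1) = pvBlockLen g + pvPre tl j := by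
        simp [pvPre, List.take_succ_cons]
      rw [hpre]
      have hlen : (List.replicate g.2.1 true ++ List.replicate g.2.2 false).length = pvBlockLen g := by
        simp [pvBlockLen]
      have := ih j hj hr
      simp only [pvBump, pvUsed] at this
      rw [this, ← hlen, Nat.add_assoc, List.set_append_right _ _ (by omega)]
      simp

lemma pvGrp_bump (st : List (Int × Nat × Nat)) (j : Nat) (_hj : j < st.length)
    (hr : 0 < (pvGet st j).2.2) :
    pvGrp (pvBump st j) = (pvGrp st).set j ((pvGet st j).1, ((pvGet st j).2.2 : Int) - 1) := by
  simp only [pvGrp, pvBump, List.map_set]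
  congr 1
  rw [show (((pvGet st j).2.2 - 1 : Nat) : Int) = ((pvGet st j).2.2 : Int) - 1 by omega]

lemma pvRem_bump (st : List (Int × Nat × Nat)) (j : Nat) (hj : j < st.length)
    (hr : 0 < (pvGet st j).2.2) : pvRem (pvBump st j) + 1 = pvRem st := by
  induction st generalizing j with
  | nil => simp at hj
  | cons g tl ih =>
    cases j with
    | zero =>
      rw [pvGet_cons_zero] at hr
      simp [pvBump, pvGet_cons_zero, pvRem]
      omega
    | succ j =>
      rw [pvGet_cons_succ] at hr
      simp only [List.length_cons, Nat.succ_lt_succ_iff] at hj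
      simp only [pvBump, pvGet_cons_succ, List.set_cons_succ, pvRem, List.map_cons, List.sum_cons]
      have := ih j hj hr
      simp only [pvBump, pvRem] at this
      omega

lemma pvGrp_getD (st : List (Int × Nat × Nat)) (j : Nat) (hj : j < st.length) :
    (pvGrp st).getD j (0,0) = ((pvGet st j).1, ((pvGet st j).2.2 : Int)) := by
  simp [pvGrp, pvGet, List.getD_eq_getElem?_getD, List.getElem?_eq_getElem hj]

-- B's _dfs at positive remaining, as a flatMap over group indices.
lemma pvDfsB_step (st : List (Int × Nat × Nat)) (path : List Int) (m : Nat) :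
    pvDfsB (pvGrp st) path (m+1)
      = (List.range st.length).flatMap (fun j =>
          if 0 < (pvGet st j).2.2 then
            pvDfsB (pvGrp (pvBump st j)) (path ++ [(pvGet st j).1]) m
          else []) := by
  simp only [pvDfsB]
  have hlen : (pvGrp st).length = st.length := by simp [pvGrp]
  rw [hlen]
  refine Eq.trans (PySem.List.foldl_congr_mem (List.range st.length) _
    (fun acc j => acc ++ (if 0 < ((pvGrp st).getD j (0,0)).2 then
      pvDfsB ((pvGrp st).set j (((pvGrp st).getD j (0,0)).1, ((pvGrp st).getD j (0,0)).2 - 1))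
        (path ++ [((pvGrp st).getD j (0,0)).1]) m else [])) []
    ?_) ?_
  · intro acc j _
    beta_reduce
    by_cases h : 0 < ((pvGrp st).getD j (0,0)).2
    · rw [if_pos h, if_pos h]
    · rw [if_neg h, if_neg h, List.append_nil]
  · rw [PySem.List.foldl_append_eq_flatMap, List.nil_append]
    apply List.flatMap_congr
    intro j hj
    rw [List.mem_range] at hj
    rw [pvGrp_getD st j hj]
    by_cases hr : 0 < (pvGet st j).2.2
    · rw [if_pos (show (0:Int) < ((pvGet st j).2.2 : Int) by exact_mod_cast hr), if_pos hr,
        ← pvGrp_bump st j hj hr]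
    · rw [if_neg (show ¬ (0:Int) < ((pvGet st j).2.2 : Int) by exact_mod_cast hr), if_neg hr]

-- A's candidate loop, evaluated over the block structure: each block with remaining > 0
-- contributes exactly one recursive call (at its first unused slot).
lemma pvDfsA_core (fuel : Nat) (nums : List Int) (used : List Bool) (path : List Int) :
    ∀ (st : List (Int × Nat × Nat)) (o : Nat) (init : List (List Int)),
    nums.drop o = pvNums st →
    used.drop o = pvUsed st →
    (0 < o → ∀ g ∈ st, nums.getD (o-1) 0 < g.1) →
    st.Pairwise (fun a b => a.1 < b.1) →
    (∀ g ∈ st, 1 ≤ pvBlockLen g) →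
    (((List.range (pvNums st).length).map (fun k => o + k)).foldl
      (fun acc i =>
        if used.getD i false then acc
        else if 0 < i ∧ nums.getD i 0 = nums.getD (i-1) 0 ∧ used.getD (i-1) false = false then acc
        else acc ++ pvDfsA nums (used.set i true) (path ++ [nums.getD i 0]) fuel) init)
    = init ++ (List.range st.length).flatMap (fun j =>
        if 0 < (pvGet st j).2.2 then
          pvDfsA nums (used.set (o + pvPre st j + (pvGet st j).2.1) true)
            (path ++ [(pvGet st j).1]) fuel
        else []) := by
  intro st
  induction st with
  | nil =>
    intro o init _ _ _ _ _
    simp [pvNums]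
  | cons g tl ih =>
    obtain ⟨v, u, r⟩ := g
    intro o init hn hu hb hp hc
    have hL1 : 1 ≤ u + r := by
      have := hc (v,u,r) List.mem_cons_self; simpa [pvBlockLen] using this
    have hnc : pvNums ((v,u,r) :: tl) = List.replicate (u+r) v ++ pvNums tl := by
      simp [pvNums, pvBlockLen]
    have huc : pvUsed ((v,u,r) :: tl)
        = (List.replicate u true ++ List.replicate r false) ++ pvUsed tl := by
      simp [pvUsed]
    have hlen : (pvNums ((v,u,r) :: tl)).length = (u+r) + (pvNums tl).length := by
      rw [hnc]; simp
    have hnk : ∀ k, k < u + r → nums.getD (o+k) 0 = v := by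
      intro k hk
      rw [List.getD_eq_getElem?_getD, ← List.getElem?_drop, hn, hnc,
        List.getElem?_append_left (by simpa using hk), List.getElem?_replicate]
      simp [hk]
    have huk : ∀ k, k < u + r → used.getD (o+k) false = decide (k < u) := by
      intro k hk
      rw [List.getD_eq_getElem?_getD, ← List.getElem?_drop, hu, huc]
      by_cases hku : k < u
      · rw [List.getElem?_append_left (by simp; omega),
          List.getElem?_append_left (by simpa using hku), List.getElem?_replicate]
        simp [hku]
      · rw [List.getElem?_append_left (by simp; omega),
          List.getElem?_append_right (by simpa using hku), List.getElem?_replicate]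
        simp only [List.length_replicate]
        have hkr : k - u < r := by omega
        simp [hkr, hku]
    have hb0 : 0 < o → nums.getD (o-1) 0 ≠ v := fun ho =>
      ne_of_lt (hb ho (v,u,r) List.mem_cons_self)
    -- the candidate loop body as a flatMap
    have hbody : ∀ (L : List Nat) (init' : List (List Int)),
        L.foldl (fun acc i =>
          if used.getD i false then acc
          else if 0 < i ∧ nums.getD i 0 = nums.getD (i-1) 0 ∧ used.getD (i-1) false = false then acc
          else acc ++ pvDfsA nums (used.set i true) (path ++ [nums.getD i 0]) fuel) init'
        = init' ++ L.flatMap (fun i =>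
          if used.getD i false then []
          else if 0 < i ∧ nums.getD i 0 = nums.getD (i-1) 0 ∧ used.getD (i-1) false = false then []
          else pvDfsA nums (used.set i true) (path ++ [nums.getD i 0]) fuel) := by
      intro L init'
      refine Eq.trans (PySem.List.foldl_congr_mem L _ (fun acc i => acc ++
        (if used.getD i false then []
         else if 0 < i ∧ nums.getD i 0 = nums.getD (i-1) 0 ∧ used.getD (i-1) false = false then []
         else pvDfsA nums (used.set i true) (path ++ [nums.getD i 0]) fuel)) init' ?_)
        (PySem.List.foldl_append_eq_flatMap _ L init')
      intro acc i _
      beta_reduce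
      split_ifs <;> simp
    -- evaluating the loop body on the first block: one contribution, at slot o+u
    have hP1 : ((List.range (u+r)).map (fun k => o + k)).flatMap (fun i =>
          if used.getD i false then []
          else if 0 < i ∧ nums.getD i 0 = nums.getD (i-1) 0 ∧ used.getD (i-1) false = false then []
          else pvDfsA nums (used.set i true) (path ++ [nums.getD i 0]) fuel)
        = (if 0 < r then pvDfsA nums (used.set (o+u) true) (path ++ [v]) fuel else []) := by
      rw [List.flatMap_map]
      by_cases hr : 0 < r
      · rw [if_pos hr]
        have hsplit : u + r = (u + 1) + (r - 1) := by omega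
        rw [hsplit, List.range_add, List.flatMap_append, List.range_succ,
          List.flatMap_append, List.flatMap_map]
        have e1 : (List.range u).flatMap (fun k =>
            if used.getD (o+k) false then []
            else if 0 < o+k ∧ nums.getD (o+k) 0 = nums.getD (o+k-1) 0 ∧ used.getD (o+k-1) false = false then []
            else pvDfsA nums (used.set (o+k) true) (path ++ [nums.getD (o+k) 0]) fuel) = [] := by
          rw [List.flatMap_eq_nil_iff]
          intro k hk
          rw [List.mem_range] at hk
          rw [huk k (by omega)]
          simp [hk]
        have e2 : ([u] : List Nat).flatMap (fun k =>
            if used.getD (o+k) false then []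
            else if 0 < o+k ∧ nums.getD (o+k) 0 = nums.getD (o+k-1) 0 ∧ used.getD (o+k-1) false = false then []
            else pvDfsA nums (used.set (o+k) true) (path ++ [nums.getD (o+k) 0]) fuel)
            = pvDfsA nums (used.set (o+u) true) (path ++ [v]) fuel := by
          simp only [List.flatMap_cons, List.flatMap_nil, List.append_nil]
          rw [huk u (by omega)]
          rw [if_neg (by simp)]
          rw [if_neg ?_, hnk u (by omega)]
          rintro ⟨h1, h2, h3⟩
          by_cases hu0 : 0 < u
          · rw [show o + u - 1 = o + (u-1) by omega, huk (u-1) (by omega)] at h3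
            simp [Nat.sub_lt hu0] at h3
          · have hu0' : u = 0 := by omega
            rcases Nat.eq_zero_or_pos o with ho | ho
            · omega
            · have hv0 : nums.getD (o+u) 0 = v := hnk u (by omega)
              rw [show o + u - 1 = o - 1 by omega] at h2
              exact hb0 ho (by rw [← h2, hv0])
        have e3 : (List.range (r-1)).flatMap (fun k =>
            if used.getD (o+(u+1+k)) false then []
            else if 0 < o+(u+1+k) ∧ nums.getD (o+(u+1+k)) 0 = nums.getD (o+(u+1+k)-1) 0
              ∧ used.getD (o+(u+1+k)-1) false = false then []
            else pvDfsA nums (used.set (o+(u+1+k)) true) (path ++ [nums.getD (o+(u+1+k)) 0]) fuel) = [] := by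
          rw [List.flatMap_eq_nil_iff]
          intro k hk
          rw [List.mem_range] at hk
          have hc1 : used.getD (o + (u+1+k)) false = false := by
            rw [huk (u+1+k) (by omega)]
            simp only [decide_eq_false_iff_not]
            omega
          have hc2 : 0 < o+(u+1+k) ∧ nums.getD (o+(u+1+k)) 0 = nums.getD (o+(u+1+k)-1) 0
              ∧ used.getD (o+(u+1+k)-1) false = false := by
            refine ⟨by omega, ?_, ?_⟩
            · rw [hnk (u+1+k) (by omega), show o + (u+1+k) - 1 = o + (u+k) by omega,
                hnk (u+k) (by omega)]
            · rw [show o + (u+1+k) - 1 = o + (u+k) by omega, huk (u+k) (by omega)]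
              simp only [decide_eq_false_iff_not]
              omega
          rw [hc1, if_neg (by simp), if_pos hc2]
        rw [e1, e2, e3]
        simp
      · rw [if_neg hr]
        have hr0 : r = 0 := by omega
        rw [List.flatMap_eq_nil_iff]
        intro k hk
        rw [List.mem_range] at hk
        rw [huk k (by omega)]
        have : k < u := by omega
        simp [this]
    -- hypotheses for the tail blocks
    have hn' : nums.drop (o + (u+r)) = pvNums tl := by
      have h := congrArg (List.drop (u+r)) hn
      rw [List.drop_drop, hnc, List.drop_left' (by simp)] at h
      exact h
    have hu' : used.drop (o + (u+r)) = pvUsed tl := by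
      have h := congrArg (List.drop (u+r)) hu
      rw [List.drop_drop, huc, List.drop_left' (by simp)] at h
      exact h
    have hb' : 0 < o + (u+r) → ∀ g ∈ tl, nums.getD (o + (u+r) - 1) 0 < g.1 := by
      intro _ g hg
      rw [show o + (u+r) - 1 = o + (u+r-1) by omega, hnk (u+r-1) (by omega)]
      exact (List.pairwise_cons.mp hp).1 g hg
    -- split the index range into the first block and the rest
    rw [hlen, List.range_add, List.map_append, List.foldl_append]
    rw [show ((List.range (pvNums tl).length).map (fun k => (u+r)+k)).map (fun k => o + k)
        = (List.range (pvNums tl).length).map (fun k => (o + (u+r)) + k) by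
      simp only [List.map_map]
      exact List.map_congr_left (fun k _ => by simp [Function.comp]; omega)]
    rw [hbody ((List.range (u+r)).map (fun k => o + k)) init, hP1]
    rw [ih (o + (u+r)) (init ++ (if 0 < r then pvDfsA nums (used.set (o+u) true) (path ++ [v]) fuel else []))
      hn' hu' hb' (List.pairwise_cons.mp hp).2 (fun g hg => hc g (List.mem_cons_of_mem _ hg))]
    -- reassemble the right-hand side
    rw [List.append_assoc]
    congr 1
    rw [show ((v,u,r) :: tl).length = tl.length + 1 by simp]
    rw [List.range_succ_eq_map, List.flatMap_cons, List.flatMap_map]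
    congr 1
    apply List.flatMap_congr
    intro j _
    simp only [Nat.succ_eq_add_one]
    rw [pvGet_cons_succ]
    rw [show pvPre ((v,u,r) :: tl) (j+1) = (u+r) + pvPre tl j by
      simp [pvPre, List.take_succ_cons, pvBlockLen]]
    rw [show o + ((u+r) + pvPre tl j) = o + (u+r) + pvPre tl j by omega]

-- The simulation: A's DFS on the flattened state equals B's DFS on the grouped state.
lemma pvMain (fuel : Nat) :
    ∀ (st : List (Int × Nat × Nat)) (path : List Int),
    st.Pairwise (fun a b => a.1 < b.1) →
    (∀ g ∈ st, 1 ≤ pvBlockLen g) →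
    pvRem st < fuel →
    path.length + pvRem st = (pvNums st).length →
    pvDfsA (pvNums st) (pvUsed st) path fuel = pvDfsB (pvGrp st) path (pvRem st) := by
  induction fuel with
  | zero => intro st path _ _ hf _; omega
  | succ fuel ih =>
    intro st path hp hc hf hl
    rcases Nat.eq_zero_or_pos (pvRem st) with h0 | hpos
    · rw [h0]; rw [h0] at hl
      simp only [pvDfsB, pvDfsA]
      rw [if_pos (by omega)]
    · obtain ⟨m, hm⟩ : ∃ m, pvRem st = m + 1 := ⟨pvRem st - 1, by omega⟩
      rw [hm, pvDfsB_step]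
      simp only [pvDfsA]
      rw [if_neg (by omega)]
      have hcore := pvDfsA_core fuel (pvNums st) (pvUsed st) path st 0 []
        (by simp) (by simp) (by omega) hp hc
      rw [show ((List.range (pvNums st).length).map (fun k => 0 + k))
          = List.range (pvNums st).length by simp] at hcore
      rw [hcore, List.nil_append]
      apply List.flatMap_congr
      intro j hj
      rw [List.mem_range] at hj
      by_cases hr : 0 < (pvGet st j).2.2
      · rw [if_pos hr, if_pos hr]
        have hmem := pvGet_mem st j hj
        rw [show (0 + pvPre st j + (pvGet st j).2.1) = pvPre st j + (pvGet st j).2.1 by omega]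
        rw [← pvUsed_bump st j hj hr]
        conv_lhs => rw [show pvNums st = pvNums (pvBump st j) from (pvNums_bump st j hj hr).symm]
        rw [show m = pvRem (pvBump st j) by have := pvRem_bump st j hj hr; omega]
        apply ih (pvBump st j) (path ++ [(pvGet st j).1])
        · have hfst : (pvBump st j).map (·.1) = st.map (·.1) := by
            simp only [pvBump, List.map_set]
            rw [show ((pvGet st j).1, (pvGet st j).2.1 + 1, (pvGet st j).2.2 - 1).1
                = (st.map (·.1))[j]'(by simpa using hj) by
              simp [pvGet, List.getD_eq_getElem?_getD, List.getElem?_eq_getElem hj]]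
            exact List.set_getElem_self (by simpa using hj)
          have : ((pvBump st j).map (·.1)).Pairwise (· < ·) := by
            rw [hfst]; exact List.pairwise_map.mpr hp
          exact List.pairwise_map.mp this
        · intro g hg
          rcases List.mem_or_eq_of_mem_set hg with h | h
          · exact hc g h
          · have := hc _ hmem
            simp only [h, pvBlockLen] at *
            omega
        · have := pvRem_bump st j hj hr
          omega
        · have := pvRem_bump st j hj hr
          rw [pvNums_bump st j hj hr]
          simp only [List.length_append, List.length_cons, List.length_nil]
          omega
      · rw [if_neg hr, if_neg hr]

-- Run-length encoding of the sorted input, and its relation to both ports' initial states.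
def pvRle : List Int → List (Int × Nat × Nat)
  | [] => []
  | v :: tl =>
    match pvRle tl with
    | [] => [(v, 0, 1)]
    | (w, u, c) :: rest => if v = w then (v, 0, c+1) :: rest else (v, 0, 1) :: (w, u, c) :: rest

lemma pvRle_shape (l : List Int) : ∀ g ∈ pvRle l, g.2.1 = 0 ∧ 1 ≤ g.2.2 := by
  induction l with
  | nil => simp [pvRle]
  | cons v tl ih =>
    intro g hg
    simp only [pvRle] at hg
    cases hrle : pvRle tl with
    | nil => rw [hrle] at hg; simp at hg; simp [hg]
    | cons p rest =>
      obtain ⟨w, u, c⟩ := p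
      rw [hrle] at hg
      by_cases hv : v = w
      · simp only [hv, if_true, List.mem_cons] at hg
        rcases hg with h | h
        · simp [h]
        · exact ih g (by rw [hrle]; exact List.mem_cons_of_mem _ h)
      · simp only [hv, if_false, List.mem_cons] at hg
        rcases hg with h | h | h
        · simp [h]
        · exact ih g (by rw [hrle, h]; exact List.mem_cons_self)
        · exact ih g (by rw [hrle]; exact List.mem_cons_of_mem _ h)

lemma pvRle_nums (l : List Int) : pvNums (pvRle l) = l := by
  induction l with
  | nil => simp [pvRle, pvNums]
  | cons v tl ih =>
    simp only [pvRle]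
    cases hrle : pvRle tl with
    | nil =>
      rw [hrle] at ih
      simp [pvNums, pvBlockLen] at ih ⊢
      exact ih
    | cons p rest =>
      obtain ⟨w, u, c⟩ := p
      have hu : u = 0 := ((pvRle_shape tl (w,u,c) (by rw [hrle]; exact List.mem_cons_self)).1)
      rw [hrle] at ih
      by_cases hv : v = w
      · simp only [hv, if_true]
        simp only [pvNums, List.flatMap_cons, pvBlockLen, hu] at ih ⊢
        rw [← ih]
        simp [List.replicate_succ]
      · simp only [hv, if_false]
        simp only [pvNums, List.flatMap_cons, pvBlockLen] at ih ⊢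
        rw [← ih]
        simp

lemma pvRle_head (v : Int) (tl : List Int) :
    ∃ u c rest, pvRle (v :: tl) = (v, u, c) :: rest := by
  simp only [pvRle]
  cases pvRle tl with
  | nil => exact ⟨0, 1, [], rfl⟩
  | cons p rest =>
    obtain ⟨w, u, c⟩ := p
    by_cases hv : v = w
    · exact ⟨0, c+1, rest, by simp [hv]⟩
    · exact ⟨0, 1, (w,u,c) :: rest, by simp [hv]⟩

lemma pvRle_pairwise (l : List Int) (h : l.Pairwise (· ≤ ·)) :
    (pvRle l).Pairwise (fun a b => a.1 < b.1) := by
  induction l with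
  | nil => simp [pvRle]
  | cons v tl ih =>
    rw [List.pairwise_cons] at h
    obtain ⟨hle, htl⟩ := h
    have ihtl := ih htl
    simp only [pvRle]
    cases hrle : pvRle tl with
    | nil => simp
    | cons p rest =>
      obtain ⟨w, u, c⟩ := p
      rw [hrle] at ihtl
      rw [List.pairwise_cons] at ihtl
      have hw : v ≤ w := by
        cases tl with
        | nil => simp [pvRle] at hrle
        | cons t0 tl' =>
          obtain ⟨u', c', rest', heq⟩ := pvRle_head t0 tl'
          rw [heq] at hrle
          have : w = t0 := by
            have := hrle
            injection this with h1 _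
            injection h1 with h2 _
            exact h2.symm
          rw [this]
          exact hle t0 List.mem_cons_self
      by_cases hv : v = w
      · simp only [hv, if_true]
        rw [List.pairwise_cons]
        exact ⟨fun g hg => ihtl.1 g hg, ihtl.2⟩
      · simp only [hv, if_false]
        rw [List.pairwise_cons]
        constructor
        · intro g hg
          rcases List.mem_cons.mp hg with h | h
          · rw [h]; exact lt_of_le_of_ne hw hv
          · exact lt_trans (lt_of_le_of_ne hw hv) (ihtl.1 g h)
        · rw [List.pairwise_cons]
          exact ihtl

lemma pvRle_rem (l : List Int) : pvRem (pvRle l) = l.length := by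
  induction l with
  | nil => simp [pvRle, pvRem]
  | cons v tl ih =>
    simp only [pvRle]
    cases hrle : pvRle tl with
    | nil =>
      rw [hrle] at ih
      simp only [pvRem, List.map_nil, List.sum_nil] at ih
      simp [pvRem, ← ih]
    | cons p rest =>
      obtain ⟨w, u, c⟩ := p
      rw [hrle] at ih
      simp only [pvRem, List.map_cons, List.sum_cons] at ih
      by_cases hv : v = w
      · simp only [hv, if_true]
        simp [pvRem]
        omega
      · simp only [hv, if_false]
        simp [pvRem]
        omega

lemma pvUsed_zero (st : List (Int × Nat × Nat)) (h : ∀ g ∈ st, g.2.1 = 0) :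
    pvUsed st = List.replicate (pvRem st) false := by
  induction st with
  | nil => simp [pvUsed, pvRem]
  | cons g tl ih =>
    have hg0 : g.2.1 = 0 := h g List.mem_cons_self
    simp only [pvUsed, List.flatMap_cons, hg0, List.replicate_zero, List.nil_append]
    rw [show List.flatMap (fun g => List.replicate g.2.1 true ++ List.replicate g.2.2 false) tl
        = pvUsed tl from rfl]
    rw [ih (fun g hg => h g (List.mem_cons_of_mem _ hg))]
    rw [← List.replicate_add]
    simp [pvRem]

lemma pvRle_used (l : List Int) : pvUsed (pvRle l) = List.replicate l.length false := by
  rw [pvUsed_zero _ (fun g hg => (pvRle_shape l g hg).1), pvRle_rem]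

lemma pvBg_replicate (c : Nat) (rest : List Int) (gs : List (Int × Int)) (v : Int) (k : Int) :
    (List.replicate c v ++ rest).foldl pvBgStep (gs ++ [(v, k)])
      = rest.foldl pvBgStep (gs ++ [(v, k + c)]) := by
  induction c generalizing gs k with
  | zero => simp
  | succ c ih =>
    rw [List.replicate_succ, List.cons_append, List.foldl_cons]
    have hstep : pvBgStep (gs ++ [(v, k)]) v = gs ++ [(v, k + 1)] := by
      simp [pvBgStep]
    rw [hstep, ih]
    have : k + 1 + (c : Int) = k + ((c : Nat) + 1 : Nat) := by push_cast; ring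
    rw [this]

lemma pvBg_main (st : List (Int × Nat × Nat)) :
    ∀ (gs : List (Int × Int)),
    st.Pairwise (fun a b => a.1 < b.1) →
    (∀ g ∈ st, g.2.1 = 0 ∧ 1 ≤ g.2.2) →
    (∀ p, gs.getLast? = some p → ∀ g ∈ st, p.1 ≠ g.1) →
    (pvNums st).foldl pvBgStep gs = gs ++ pvGrp st := by
  induction st with
  | nil => intro gs _ _ _; simp [pvNums, pvGrp]
  | cons g tl ih =>
    intro gs hp hc hlast
    obtain ⟨v, u, r⟩ := g
    have hu : u = 0 := (hc (v,u,r) List.mem_cons_self).1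
    obtain ⟨c, hcr⟩ : ∃ c, r = c + 1 :=
      ⟨r - 1, by have h2 := (hc (v,u,r) List.mem_cons_self).2; simp at h2; omega⟩
    rw [List.pairwise_cons] at hp
    have hnc : pvNums ((v,u,r) :: tl) = v :: (List.replicate c v ++ pvNums tl) := by
      simp [pvNums, pvBlockLen, hu, hcr, List.replicate_succ]
    rw [hnc, List.foldl_cons]
    have hstep : pvBgStep gs v = gs ++ [(v, 1)] := by
      cases hl : gs.getLast? with
      | none =>
        rw [List.getLast?_eq_none_iff.mp hl]
        simp [pvBgStep]
      | some p =>
        have hne : p.1 ≠ v := hlast p hl (v,u,r) List.mem_cons_self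
        simp [pvBgStep, hl, hne]
    rw [hstep, pvBg_replicate]
    have h1c : (1 : Int) + c = ((r : Nat) : Int) := by rw [hcr]; push_cast; ring
    rw [h1c]
    rw [ih (gs ++ [(v, (r : Int))]) hp.2
      (fun g hg => hc g (List.mem_cons_of_mem _ hg))
      (by
        intro p hp' g hg
        rw [List.getLast?_concat] at hp'
        injection hp' with h
        rw [← h]
        exact ne_of_lt (hp.1 g hg))]
    simp [pvGrp]

lemma pvRle_grp (l : List Int) (h : l.Pairwise (· ≤ ·)) :
    l.foldl pvBgStep [] = pvGrp (pvRle l) := by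
  conv_lhs => rw [← pvRle_nums l]
  rw [pvBg_main (pvRle l) [] (pvRle_pairwise l h) (pvRle_shape l) (by intro p hp; simp at hp)]
  simp

lemma pvTop (nums : List Int) (hsort : nums.Pairwise (· ≤ ·)) :
    pvDfsA nums (List.replicate nums.length false) [] (nums.length + 1)
      = pvDfsB (nums.foldl pvBgStep []) [] nums.length := by
  have h := pvMain (nums.length + 1) (pvRle nums) []
    (pvRle_pairwise nums hsort)
    (by intro g hg; have := pvRle_shape nums g hg; simp [pvBlockLen]; omega)
    (by rw [pvRle_rem]; omega)
    (by rw [pvRle_rem, pvRle_nums]; simp)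
  rw [pvRle_nums, pvRle_used, pvRle_rem, ← pvRle_grp nums hsort] at h
  exact h

-- ===== VERDICT (by name: the statement is the Claim_ definition above) =====
theorem permutations_no_duplicates_spec : Claim_equal_permutations_no_duplicates := by
  intro values _
  unfold Spec_permutations_no_duplicates permutations_no_duplicates permutations_no_duplicates_alt
  exact pvTop _ (by simpa using PySem.List.sorted_pairwise (xs := values) (key := fun x => x))
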